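-- pv_equiv track=rewrite | github.com/mhuzaifashah/devo | aiagent/compaction.py | prune_tool_outputs
-- ===== SOURCE A (Python) =====
-- Message = dict[str, object]
--
-- def prune_tool_outputs(messages: list[Message], keep: int | None = 10) -> list[Message]:
--     if keep is None:
--         return messages
--     indices = [index for index, item in enumerate(messages) if item.get("role") == "tool"]
--     if len(indices) <= keep:
--         return messages
--     remove = set(indices[: len(indices) - keep])
--     return [item for index, item in enumerate(messages) if index not in remove]
-- ===== SOURCE B (Python) =====
-- def prune_tool_outputs(messages, keep=10):
--     if keep is None:
--         return messages
--     out = []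
--     seen = 0
--     for item in reversed(messages):
--         if item.get("role") == "tool":
--             if seen < keep:
--                 seen += 1
--                 out.append(item)
--         else:
--             out.append(item)
--     out.reverse()
--     return out
-- ===== Notes on version B (the rewrite author's own statement) =====
-- stated objective: alternative
-- what changed: B makes one backward pass over reversed(messages), keeping a tool message only while fewer than keep tools have been seen from the end, instead of A's staged enumerate-collect-indices / slice / set-membership filtering; no precount, no index set, no drop computation.
import Mathlib
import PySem

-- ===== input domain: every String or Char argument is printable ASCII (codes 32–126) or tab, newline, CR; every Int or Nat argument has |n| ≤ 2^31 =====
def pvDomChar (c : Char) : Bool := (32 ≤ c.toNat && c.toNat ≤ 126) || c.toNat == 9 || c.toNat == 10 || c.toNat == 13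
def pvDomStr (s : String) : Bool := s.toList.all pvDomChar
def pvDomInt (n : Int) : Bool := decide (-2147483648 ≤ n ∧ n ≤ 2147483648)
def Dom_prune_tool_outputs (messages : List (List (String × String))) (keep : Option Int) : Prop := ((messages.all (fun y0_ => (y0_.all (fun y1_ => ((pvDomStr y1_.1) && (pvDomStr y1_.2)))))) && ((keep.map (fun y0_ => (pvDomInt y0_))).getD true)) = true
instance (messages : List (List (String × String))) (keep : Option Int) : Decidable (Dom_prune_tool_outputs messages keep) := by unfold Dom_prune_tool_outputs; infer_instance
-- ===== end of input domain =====

-- ===== PORT A =====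
-- One honest line: B replaces A's three-stage enumerate/index-list/set filtering with a single
-- backward pass that keeps the last `keep` tool messages via a running counter (objective: alternative);
-- equivalence is about the RETURN value (A returns the original object in its no-op branches, B a fresh equal list).
-- item.get("role") == "tool": first-match association-list lookup; a missing key gives none ≠ some "tool"
def pvIsTool (m : List (String × String)) : Bool := m.lookup "role" == some "tool"

def prune_tool_outputs (messages : List (List (String × String))) (keep : Option Int) : List (List (String × String)) :=
  match keep with
  | none => messages
  | some k =>
    let indices : List Int := ((PySem.List.enumerate messages 0).filter (fun p => pvIsTool p.2)).map (fun p => p.1)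
    if (indices.length : Int) ≤ k then messages
    else
      let remove : PySem.Set Int := PySem.Set.ofList (PySem.List.slice indices none (some ((indices.length : Int) - k)))
      ((PySem.List.enumerate messages 0).filter (fun p => !(PySem.Set.contains remove p.1))).map (fun p => p.2)

-- ===== PORT B =====
-- the for-loop of Source B over reversed(messages): state = (out, seen), out.append(item) = out ++ [item]
def pvLoopB (k : Int) (ms : List (List (String × String))) (out : List (List (String × String))) (seen : Int) : List (List (String × String)) :=
  match ms with
  | [] => out
  | m :: rest =>
    if pvIsTool m then
      if seen < k then pvLoopB k rest (out ++ [m]) (seen + 1) else pvLoopB k rest out seen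
    else pvLoopB k rest (out ++ [m]) seen

def prune_tool_outputs_alt (messages : List (List (String × String))) (keep : Option Int) : List (List (String × String)) :=
  match keep with
  | none => messages
  | some k => (pvLoopB k messages.reverse [] 0).reverse

-- ===== PRECONDITION & SPEC =====
def Spec_prune_tool_outputs (messages : List (List (String × String))) (keep : Option Int) (out : List (List (String × String))) : Prop := out = prune_tool_outputs_alt messages keep
instance (messages : List (List (String × String))) (keep : Option Int) (out : List (List (String × String))) : Decidable (Spec_prune_tool_outputs messages keep out) := by unfold Spec_prune_tool_outputs; infer_instance

-- ===== CLAIM (what is proved, stated in full; the proofs are below) =====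
def Claim_equal_prune_tool_outputs : Prop := ∀ (messages : List (List (String × String))) (keep : Option Int), Dom_prune_tool_outputs messages keep → Spec_prune_tool_outputs messages keep (prune_tool_outputs messages keep)

-- ===== LEMMAS AND PROOFS =====

-- proof-only intermediate form: drop the first `drop` tool messages (both ports are reduced to it)
def pvPruneLoop (drop : Int) (ms : List (List (String × String))) : List (List (String × String)) :=
  match ms with
  | [] => []
  | m :: rest =>
    if pvIsTool m && decide (0 < drop) then pvPruneLoop (drop - 1) rest
    else m :: pvPruneLoop drop rest

lemma pvPruneLoop_nonpos (d : Int) (hd : d ≤ 0) (ms : List (List (String × String))) : pvPruneLoop d ms = ms := by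
  induction ms with
  | nil => rfl
  | cons m rest ih => simp [pvPruneLoop, ih, show ¬ (0 : Int) < d by omega]

lemma pvPruneLoop_all (d : Int) (ms : List (List (String × String)))
    (hd : (ms.countP (fun m => pvIsTool m) : Int) ≤ d) :
    pvPruneLoop d ms = ms.filter (fun m => !pvIsTool m) := by
  induction ms generalizing d with
  | nil => rfl
  | cons m rest ih =>
    rw [List.countP_cons] at hd
    by_cases hm : pvIsTool m = true
    · have h0 : (0 : Int) < d := by
        have : (0:Nat) ≤ rest.countP (fun m => pvIsTool m) := Nat.zero_le _
        simp [hm] at hd; omega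
      rw [pvPruneLoop, if_pos (by simp [hm, h0]), List.filter_cons_of_neg (by simp [hm])]
      exact ih (d - 1) (by simp [hm] at hd; omega)
    · have hmf : pvIsTool m = false := by simpa using hm
      rw [pvPruneLoop, if_neg (by simp [hmf]), List.filter_cons_of_pos (by simp [hmf])]
      rw [ih d (by simp [hmf] at hd; omega)]

lemma pvPruneLoop_snoc (d : Int) (l : List (List (String × String))) (m : List (String × String)) :
    pvPruneLoop d (l ++ [m]) =
      pvPruneLoop d l ++
        (if pvIsTool m ∧ (l.countP (fun x => pvIsTool x) : Int) < d then [] else [m]) := by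
  induction l generalizing d with
  | nil =>
    by_cases hm : pvIsTool m = true
    · by_cases h0 : (0 : Int) < d
      · simp [pvPruneLoop, hm, h0]
      · simp [pvPruneLoop, hm, h0]
    · have hmf : pvIsTool m = false := by simpa using hm
      simp [pvPruneLoop, hmf]
  | cons x l ih =>
    rw [List.cons_append, pvPruneLoop, pvPruneLoop, List.countP_cons]
    by_cases hbr : (pvIsTool x && decide ((0:Int) < d)) = true
    · have hx : pvIsTool x = true := by simp at hbr; exact hbr.1
      rw [if_pos hbr, if_pos hbr, ih (d - 1)]
      congr 1
      refine if_congr ?_ rfl rfl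
      constructor
      · rintro ⟨h1, h2⟩
        refine ⟨h1, ?_⟩
        simp only [hx, if_true]
        push_cast
        omega
      · rintro ⟨h1, h2⟩
        simp only [hx, if_true] at h2
        push_cast at h2
        exact ⟨h1, by omega⟩
    · rw [if_neg (by simpa using hbr), if_neg (by simpa using hbr), List.cons_append, ih d]
      congr 2
      by_cases hx : pvIsTool x = true
      · have hd0 : ¬ ((0:Int) < d) := by simp [hx] at hbr; omega
        have hn1 : (0:Int) ≤ (l.countP (fun x => pvIsTool x) : Int) := Int.natCast_nonneg _
        rw [if_neg (by rintro ⟨-, hlt⟩; omega),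
          if_neg (by rintro ⟨-, hlt⟩; push_cast at hlt; omega)]
      · have hxf : pvIsTool x = false := by simpa using hx
        simp [hxf]

lemma pvLoopB_acc (k : Int) (ms : List (List (String × String))) (out : List (List (String × String))) (s : Int) :
    pvLoopB k ms out s = out ++ pvLoopB k ms [] s := by
  induction ms generalizing out s with
  | nil => simp [pvLoopB]
  | cons m rest ih =>
    by_cases hm : pvIsTool m = true
    · by_cases hs : s < k
      · rw [pvLoopB, if_pos hm, if_pos hs, pvLoopB, if_pos hm, if_pos hs,
          ih (out ++ [m]), ih ([] ++ [m])]
        simp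
      · rw [pvLoopB, if_pos hm, if_neg hs, pvLoopB, if_pos hm, if_neg hs]
        exact ih out s
    · have hmf : pvIsTool m = false := by simpa using hm
      rw [pvLoopB, if_neg (by simp [hmf]), pvLoopB, if_neg (by simp [hmf]),
        ih (out ++ [m]), ih ([] ++ [m])]
      simp

lemma pvLoopB_reverse (k : Int) (rms : List (List (String × String))) (s : Int) :
    (pvLoopB k rms [] s).reverse
      = pvPruneLoop ((rms.countP (fun m => pvIsTool m) : Int) - (k - s)) rms.reverse := by
  induction rms generalizing s with
  | nil => rfl
  | cons m rest ih =>
    rw [List.reverse_cons, List.countP_cons]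
    by_cases hm : pvIsTool m = true
    · by_cases hs : s < k
      · rw [pvLoopB, if_pos hm, if_pos hs, pvLoopB_acc, List.reverse_append,
          List.nil_append, List.reverse_singleton, ih (s + 1)]
        rw [pvPruneLoop_snoc]
        have hnc : ¬ (pvIsTool m = true ∧
            ((rest.reverse.countP (fun x => pvIsTool x) : Int) <
              ((rest.countP (fun m => pvIsTool m) + if pvIsTool m then 1 else 0 : Nat) : Int) - (k - s))) := by
          rintro ⟨-, hlt⟩
          rw [List.countP_reverse] at hlt
          simp [hm] at hlt; omega
        rw [if_neg hnc]
        congr 2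
        simp [hm]; omega
      · rw [pvLoopB, if_pos hm, if_neg hs, ih s, pvPruneLoop_snoc]
        have ht : (rest.reverse.countP (fun x => pvIsTool x) : Int) <
            ((rest.countP (fun m => pvIsTool m) + if pvIsTool m then 1 else 0 : Nat) : Int) - (k - s) := by
          rw [List.countP_reverse]; simp [hm]; omega
        have hcond : pvIsTool m = true ∧
            ((rest.reverse.countP (fun x => pvIsTool x) : Int) <
              ((rest.countP (fun m => pvIsTool m) + if pvIsTool m = true then 1 else 0 : Nat) : Int) - (k - s)) :=
          ⟨hm, ht⟩
        rw [if_pos hcond, List.append_nil]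
        rw [pvPruneLoop_all _ _ (by rw [List.countP_reverse]; omega),
          pvPruneLoop_all _ _ (by rw [List.countP_reverse]; simp [hm]; omega)]
    · have hmf : pvIsTool m = false := by simpa using hm
      rw [pvLoopB, if_neg (by simp [hmf]), pvLoopB_acc, List.reverse_append,
        List.nil_append, List.reverse_singleton, ih s, pvPruneLoop_snoc]
      rw [if_neg (by simp [hmf])]
      congr 2
      simp [hmf]

lemma pv_enumerate_fst_lt {α : Type} (rest : List α) (i : Int) (p : Int × α)
    (hp : p ∈ PySem.List.enumerate rest (i + 1)) : i < p.1 := by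
  rcases (PySem.List.mem_enumerate_iff _ _ _).1 hp with ⟨k, hk, rfl⟩
  simp; omega

lemma pv_toolIdx_lt (rest : List (List (String × String))) (i : Int) (x : Int)
    (hx : x ∈ (((PySem.List.enumerate rest (i + 1)).filter (fun p => pvIsTool p.2)).map (fun p => p.1))) :
    i < x := by
  rcases List.mem_map.1 hx with ⟨p, hp, rfl⟩
  exact pv_enumerate_fst_lt rest i p (List.mem_of_mem_filter hp)

lemma pv_not_contains_of_lt (l : List Int) (i : Int) (h : ∀ x ∈ l, i < x) :
    PySem.Set.contains (PySem.Set.ofList l) i = false := by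
  rw [Bool.eq_false_iff]
  intro hc
  have := (PySem.Set.contains_iff _ _).1 hc
  have := h i ((PySem.Set.mem_ofList _ _).1 this)
  omega

lemma pv_contains_ofList_cons_of_ne (x i : Int) (l : List Int) (h : x ≠ i) :
    PySem.Set.contains (PySem.Set.ofList (i :: l)) x = PySem.Set.contains (PySem.Set.ofList l) x := by
  apply Bool.eq_iff_iff.mpr
  rw [PySem.Set.contains_iff, PySem.Set.contains_iff]
  simp [PySem.Set.mem_ofList, h]

lemma pv_core (ms : List (List (String × String))) (i : Int) (n : Nat) :
    (((PySem.List.enumerate ms i).filter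
        (fun p => !(PySem.Set.contains
          (PySem.Set.ofList
            ((((PySem.List.enumerate ms i).filter (fun p => pvIsTool p.2)).map (fun p => p.1)).take n))
          p.1))).map (fun p => p.2))
      = pvPruneLoop (n : Int) ms := by
  induction ms generalizing i n with
  | nil => simp [PySem.List.enumerate_nil, pvPruneLoop]
  | cons m rest ih =>
    cases n with
    | zero =>
      have hq : (fun p : Int × List (String × String) =>
            !(PySem.Set.contains (PySem.Set.ofList
              ((((PySem.List.enumerate (m :: rest) i).filter (fun p => pvIsTool p.2)).map (fun p => p.1)).take 0)) p.1))
          = fun _ => true := by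
        funext p; rw [List.take_zero]; rfl
      rw [hq, List.filter_eq_self.mpr (fun a _ => rfl), PySem.List.map_snd_enumerate,
        Nat.cast_zero, pvPruneLoop_nonpos 0 le_rfl]
    | succ n' =>
      rw [PySem.List.enumerate_cons]
      by_cases hP : pvIsTool m = true
      · have h1 : List.filter (fun p => pvIsTool p.2) ((i, m) :: PySem.List.enumerate rest (i + 1))
            = (i, m) :: List.filter (fun p => pvIsTool p.2) (PySem.List.enumerate rest (i + 1)) :=
          List.filter_cons_of_pos hP
        rw [h1]
        simp only [List.map_cons, List.take_succ_cons]
        have hct : PySem.Set.contains (PySem.Set.ofList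
            (i :: ((((PySem.List.enumerate rest (i + 1)).filter (fun p => pvIsTool p.2)).map (fun p => p.1)).take n'))) i = true := by
          rw [PySem.Set.contains_iff, PySem.Set.mem_ofList]; simp
        rw [List.filter_cons_of_neg (by simp only [hct]; decide)]
        have h2 : List.filter (fun p : Int × List (String × String) =>
              !(PySem.Set.contains (PySem.Set.ofList
                (i :: ((((PySem.List.enumerate rest (i + 1)).filter (fun p => pvIsTool p.2)).map (fun p => p.1)).take n'))) p.1))
              (PySem.List.enumerate rest (i + 1))
            = List.filter (fun p : Int × List (String × String) =>
              !(PySem.Set.contains (PySem.Set.ofList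
                (((((PySem.List.enumerate rest (i + 1)).filter (fun p => pvIsTool p.2)).map (fun p => p.1))).take n')) p.1))
              (PySem.List.enumerate rest (i + 1)) := by
          refine List.filter_congr (fun p hp => ?_)
          have hne : p.1 ≠ i := by have := pv_enumerate_fst_lt rest i p hp; omega
          rw [pv_contains_ofList_cons_of_ne p.1 i _ hne]
        rw [h2, ih]
        have hpos : decide ((0 : Int) < ((n' + 1 : Nat) : Int)) = true :=
          decide_eq_true (by exact_mod_cast Nat.succ_pos n')
        have hcast : ((n' + 1 : Nat) : Int) - 1 = (n' : Int) := by push_cast; ring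
        conv_rhs => rw [pvPruneLoop]
        rw [hP, hpos, Bool.and_self, if_pos rfl, hcast]
      · have hPf : pvIsTool m = false := by simpa using hP
        have h1 : List.filter (fun p => pvIsTool p.2) ((i, m) :: PySem.List.enumerate rest (i + 1))
            = List.filter (fun p => pvIsTool p.2) (PySem.List.enumerate rest (i + 1)) :=
          List.filter_cons_of_neg (by simp [hPf])
        rw [h1]
        have hnc : PySem.Set.contains (PySem.Set.ofList
            (((((PySem.List.enumerate rest (i + 1)).filter (fun p => pvIsTool p.2)).map (fun p => p.1))).take (n' + 1))) i = false :=
          pv_not_contains_of_lt _ i (fun x hx => pv_toolIdx_lt rest i x (List.mem_of_mem_take hx))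
        rw [List.filter_cons_of_pos (by simp only [hnc]; rfl)]
        simp only [List.map_cons]
        rw [ih]
        conv_rhs => rw [pvPruneLoop]
        rw [hPf, Bool.false_and, if_neg (by simp)]

lemma pv_len_eq (messages : List (List (String × String))) :
    ((((PySem.List.enumerate messages 0).filter (fun p => pvIsTool p.2)).map (fun p => p.1)).length : Int)
      = (messages.countP (fun m => pvIsTool m) : Int) := by
  congr 1
  rw [List.length_map, ← List.countP_eq_length_filter]
  conv_rhs => rw [← PySem.List.map_snd_enumerate messages 0]
  rw [List.countP_map]
  rfl

-- both ports compute pvPruneLoop (t - k) messages (the ≤-branch included, since t - k ≤ 0 is the identity)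
lemma pv_alt_eq_prune (messages : List (List (String × String))) (k : Int) :
    prune_tool_outputs_alt messages (some k)
      = pvPruneLoop ((messages.countP (fun m => pvIsTool m) : Int) - k) messages := by
  rw [show prune_tool_outputs_alt messages (some k) = (pvLoopB k messages.reverse [] 0).reverse from rfl]
  rw [pvLoopB_reverse k messages.reverse 0, List.countP_reverse, List.reverse_reverse]
  congr 1
  omega

-- ===== VERDICT (by name: the statement is the Claim_ definition above) =====
theorem prune_tool_outputs_spec : Claim_equal_prune_tool_outputs := by
  intro messages keep _
  unfold Spec_prune_tool_outputs
  cases keep with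
  | none => rfl
  | some k =>
    rw [pv_alt_eq_prune]
    unfold prune_tool_outputs
    simp only []
    rw [pv_len_eq messages]
    by_cases hle : (messages.countP (fun m => pvIsTool m) : Int) ≤ k
    · rw [if_pos hle, pvPruneLoop_nonpos _ (by omega)]
    · rw [if_neg hle]
      have hd : (0 : Int) ≤ (messages.countP (fun m => pvIsTool m) : Int) - k := by omega
      rw [PySem.List.slice_to _ hd, ← pv_len_eq messages, pv_core messages 0]
      congr 1
      rw [pv_len_eq messages]
      omega
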